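-- pv_equiv track=rewrite | github.com/nicholas-camarda/ffbayes | tests/test_documentation_contracts.py | _normalize_bash_lines
-- ===== SOURCE A (Python) =====
-- def _normalize_bash_lines(lines: list[str]) -> list[str]:
--     commands: list[str] = []
--     active = ''
--     for raw_line in lines:
--         line = raw_line.strip()
--         if not line or line.startswith('#'):
--             continue
--         if active:
--             active = f'{active} {line}'
--         else:
--             active = line
--         if active.endswith('\\'):
--             active = active[:-1].rstrip()
--             continue
--         commands.append(active)
--         active = ''
--     if active:
--         commands.append(active)
--     return [command for command in commands if command.startswith('ffbayes ')]
-- ===== SOURCE B (Python) =====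
-- def _normalize_bash_lines(lines: list[str]) -> list[str]:
--     cleaned = [s for s in (raw.strip() for raw in lines) if s and not s.startswith('#')]
--     # Traverse the cleaned lines BACKWARDS: a line without a trailing backslash starts
--     # a group; continuation pieces seen further left are prepended to the open group,
--     # and each group is emitted (back-to-front) when the next terminator is reached.
--     rev_commands: list[str] = []
--     cur: list[str] = []
--     for line in reversed(cleaned):
--         if line.endswith('\\'):
--             piece = line[:-1].rstrip()
--             if piece:
--                 cur = [piece] + cur
--         else:
--             if cur:
--                 rev_commands.append(' '.join(cur))
--             cur = [line]
--     if cur: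
--         rev_commands.append(' '.join(cur))
--     commands = rev_commands[::-1]
--     return [c for c in commands if c.startswith('ffbayes ')]
-- ===== Notes on version B (the rewrite author's own statement) =====
-- stated objective: alternative
-- what changed: Instead of A's forward single pass with a growing string accumulator, B first strip-filters the lines, then traverses the cleaned list in REVERSE: each non-continuation line opens a group, continuation pieces found further left are prepended to it, groups are emitted back-to-front and the list is reversed at the end before the prefix filter.
import Mathlib
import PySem

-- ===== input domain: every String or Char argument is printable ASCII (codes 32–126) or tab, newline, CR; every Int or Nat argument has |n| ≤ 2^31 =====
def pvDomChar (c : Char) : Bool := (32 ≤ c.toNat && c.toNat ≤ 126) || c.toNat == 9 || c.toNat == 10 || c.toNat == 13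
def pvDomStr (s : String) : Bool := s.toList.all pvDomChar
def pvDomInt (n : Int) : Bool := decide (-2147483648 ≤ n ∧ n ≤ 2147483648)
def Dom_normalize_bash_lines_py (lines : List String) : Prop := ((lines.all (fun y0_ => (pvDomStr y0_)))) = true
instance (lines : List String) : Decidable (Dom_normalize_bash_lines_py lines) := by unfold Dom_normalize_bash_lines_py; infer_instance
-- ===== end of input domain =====

-- B replaces A's forward pass with a growing string accumulator by a strip-filter pre-pass
-- followed by a REVERSE traversal: terminator lines open groups, continuation pieces are
-- prepended, commands are emitted back-to-front and reversed at the end; objective: alternative.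

-- ===== PORT A =====
-- loop body of A's single for-loop, state = (commands, active)
def nblStepA (st : List String × String) (raw_line : String) : List String × String :=
  let line := PySem.Str.strip raw_line
  if decide (line = "") || PySem.Str.startswith line "#" then st
  else
    let active := if st.2 ≠ "" then st.2 ++ " " ++ line else line
    if PySem.Str.endswith active "\\" then
      (st.1, PySem.Str.rstrip (PySem.Str.slice active none (some (-1))))
    else
      (st.1 ++ [active], "")

def normalize_bash_lines_py (lines : List String) : List String :=
  let st := lines.foldl nblStepA ([], "")
  let commands := if st.2 ≠ "" then st.1 ++ [st.2] else st.1
  commands.filter (fun command => PySem.Str.startswith command "ffbayes ")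

-- ===== PORT B =====
-- loop body of B's reverse traversal, state = (rev_commands, cur)
def nblStepB (st : List String × List String) (line : String) : List String × List String :=
  if PySem.Str.endswith line "\\" then
    let piece := PySem.Str.rstrip (PySem.Str.slice line none (some (-1)))
    if piece ≠ "" then (st.1, piece :: st.2) else st
  else
    ((if st.2 ≠ [] then st.1 ++ [PySem.Str.join " " st.2] else st.1), [line])

def normalize_bash_lines_py_alt (lines : List String) : List String :=
  let cleaned := (lines.map (fun raw => PySem.Str.strip raw)).filter
      (fun s => decide (s ≠ "") && !PySem.Str.startswith s "#")
  let st := cleaned.reverse.foldl nblStepB ([], [])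
  let rev_commands := if st.2 ≠ [] then st.1 ++ [PySem.Str.join " " st.2] else st.1
  let commands := rev_commands.reverse
  commands.filter (fun c => PySem.Str.startswith c "ffbayes ")

-- ===== PRECONDITION & SPEC =====
def Spec_normalize_bash_lines_py (lines : List String) (out : List String) : Prop := out = normalize_bash_lines_py_alt lines
instance (lines : List String) (out : List String) : Decidable (Spec_normalize_bash_lines_py lines out) := by unfold Spec_normalize_bash_lines_py; infer_instance

-- ===== CLAIM (what is proved, stated in full; the proofs are below) =====
def Claim_equal_normalize_bash_lines_py : Prop := ∀ (lines : List String), Dom_normalize_bash_lines_py lines → Spec_normalize_bash_lines_py lines (normalize_bash_lines_py lines)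

-- ===== LEMMAS AND PROOFS =====

-- rstrip of a concatenation: keep the left part intact when the right part survives
theorem nbl_rstrip_append (xs ys : List Char) :
    PySem.Chars.rstrip (xs ++ ys) =
      if PySem.Chars.rstrip ys = [] then PySem.Chars.rstrip xs else xs ++ PySem.Chars.rstrip ys := by
  simp only [PySem.Chars.rstrip, List.reverse_append, List.dropWhile_append,
    List.isEmpty_iff, List.reverse_eq_nil_iff]
  split_ifs with h
  · rfl
  · simp

theorem nbl_rstrip_idem (s : List Char) :
    PySem.Chars.rstrip (PySem.Chars.rstrip s) = PySem.Chars.rstrip s := by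
  simp [PySem.Chars.rstrip, List.dropWhile_idempotent]

theorem nbl_rstrip_strip (s : List Char) :
    PySem.Chars.rstrip (PySem.Chars.strip s) = PySem.Chars.strip s := by
  simp [PySem.Chars.strip, nbl_rstrip_idem]

-- a single-char suffix only looks at the (nonempty) right part
theorem nbl_endswith_append (xs ys : List Char) (c : Char) (h : ys ≠ []) :
    PySem.Chars.endswith (xs ++ ys) [c] = PySem.Chars.endswith ys [c] := by
  simp only [PySem.Chars.endswith, List.isSuffixOf, List.reverse_append]
  rcases List.exists_cons_of_ne_nil (by simpa using h : ys.reverse ≠ []) with ⟨a, t, ht⟩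
  simp [ht, List.isPrefixOf]

theorem nbl_join_append_singleton (sep : List Char) (ps : List (List Char)) (l : List Char) :
    PySem.Chars.join sep (ps ++ [l]) =
      if ps = [] then l else PySem.Chars.join sep ps ++ sep ++ l := by
  induction ps with
  | nil => simp [PySem.Chars.join_singleton]
  | cons p t ih =>
    cases t with
    | nil => simp [PySem.Chars.join_cons_cons, PySem.Chars.join_singleton]
    | cons q u =>
      have ih' : PySem.Chars.join sep (q :: (u ++ [l]))
          = PySem.Chars.join sep (q :: u) ++ sep ++ l := by simpa using ih
      simp only [List.cons_append, PySem.Chars.join_cons_cons, ih']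
      simp

theorem nbl_join_eq_nil (ps : List (List Char)) (h : ∀ p ∈ ps, p ≠ []) :
    PySem.Chars.join [' '] ps = [] ↔ ps = [] := by
  cases ps with
  | nil => simp [PySem.Chars.join_nil]
  | cons p t =>
    cases t with
    | nil =>
      simp only [PySem.Chars.join_singleton]
      simpa using h p (by simp)
    | cons q u => simp [PySem.Chars.join_cons_cons]

-- the string ' '.join on the String level, via the Chars level
theorem nbl_join_str (ps : List String) :
    (PySem.Str.join " " ps).toList = PySem.Chars.join [' '] (ps.map String.toList) := by
  have : (" " : String).toList = [' '] := by decide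
  simp [PySem.Str.join, this]

-- common recursive specification over the cleaned lines, accumulator = list of pieces
def nblGo (pieces : List String) : List String → List String
  | [] => if pieces ≠ [] then [PySem.Str.join " " pieces] else []
  | l :: rest =>
    if PySem.Str.endswith l "\\" then
      let p := PySem.Str.rstrip (PySem.Str.slice l none (some (-1)))
      nblGo (if p ≠ "" then pieces ++ [p] else pieces) rest
    else PySem.Str.join " " (pieces ++ [l]) :: nblGo [] rest

-- invariant relating A's string accumulator to the spec's list of pieces
def nblInv (active : String) (parts : List String) : Prop :=
  active.toList = PySem.Chars.join [' '] (parts.map String.toList)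
  ∧ PySem.Chars.rstrip active.toList = active.toList
  ∧ ∀ p ∈ parts, p ≠ ""

theorem nbl_parts_ne_iff {active : String} {parts : List String}
    (hinv : nblInv active parts) : active = "" ↔ parts = [] := by
  obtain ⟨h1, -, h3⟩ := hinv
  have h4 : ∀ q ∈ parts.map String.toList, q ≠ [] := by
    intro q hq
    simp only [List.mem_map] at hq
    obtain ⟨p, hp, rfl⟩ := hq
    simpa [Ne, String.toList_eq_nil_iff] using h3 p hp
  rw [← String.toList_eq_nil_iff, h1, nbl_join_eq_nil _ h4, List.map_eq_nil_iff]

theorem nbl_active_join {active : String} {parts : List String}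
    (hinv : nblInv active parts) : active = PySem.Str.join " " parts := by
  rw [← String.toList_inj, nbl_join_str, hinv.1]

-- A side: the foldl over the raw lines, flushed, equals the spec over the cleaned lines
theorem nbl_A_go : ∀ (ls cmds : List String) (active : String) (pieces : List String),
    nblInv active pieces →
    (if (ls.foldl nblStepA (cmds, active)).2 ≠ "" then
        (ls.foldl nblStepA (cmds, active)).1 ++ [(ls.foldl nblStepA (cmds, active)).2]
      else (ls.foldl nblStepA (cmds, active)).1)
    = cmds ++ nblGo pieces ((ls.map (fun raw => PySem.Str.strip raw)).filter
        (fun s => decide (s ≠ "") && !PySem.Str.startswith s "#")) := by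
  intro ls
  induction ls with
  | nil =>
    intro cmds active pieces hinv
    simp only [List.foldl_nil, List.map_nil, List.filter_nil, nblGo]
    by_cases hA0 : active = ""
    · rw [if_neg (by simp [hA0]), if_neg (by simp [(nbl_parts_ne_iff hinv).mp hA0])]
      simp
    · have hpne : pieces ≠ [] := fun h => hA0 ((nbl_parts_ne_iff hinv).mpr h)
      rw [if_pos hA0, if_pos hpne, nbl_active_join hinv]
  | cons raw ls ih =>
    intro cmds active pieces hinv
    simp only [List.foldl_cons, List.map_cons, List.filter_cons]
    by_cases hskip : PySem.Str.strip raw = "" ∨ PySem.Str.startswith (PySem.Str.strip raw) "#" = true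
    · have hskip' : PySem.Chars.strip raw.toList = [] ∨ PySem.Chars.startswith (PySem.Chars.strip raw.toList) ['#'] = true := by
        rcases hskip with h | h
        · exact Or.inl (by simpa [String.toList_eq_nil_iff] using congrArg String.toList h)
        · exact Or.inr (by simpa using h)
      have hA : nblStepA (cmds, active) raw = (cmds, active) := by
        unfold nblStepA
        rcases hskip' with h | h
        · simp [h, PySem.Str.strip]
        · simp [h]
      have hPf : (decide (PySem.Str.strip raw ≠ "") && !PySem.Str.startswith (PySem.Str.strip raw) "#") = false := by
        rcases hskip with h | h
        · simp [h]
        · have h' : PySem.Chars.startswith (PySem.Chars.strip raw.toList) ['#'] = true := by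
            simpa using h
          simp [h']
      rw [hA, hPf]
      exact ih cmds active pieces hinv
    · push Not at hskip
      obtain ⟨hne, hnh⟩ := hskip
      have hnh' : PySem.Chars.startswith (PySem.Chars.strip raw.toList) ['#'] = false := by
        simpa using hnh
      have hne' : ¬ PySem.Chars.strip raw.toList = [] := by
        intro h
        exact hne (by rw [← String.toList_inj]; simpa [PySem.Str.strip] using h)
      have hPt : (decide (PySem.Str.strip raw ≠ "") && !PySem.Str.startswith (PySem.Str.strip raw) "#") = true := by
        simp [hne, hnh']
      rw [hPt, if_pos rfl]
      have hlne : (PySem.Str.strip raw).toList ≠ [] := by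
        simpa [PySem.Str.strip] using hne'
      have hGuard : nblStepA (cmds, active) raw
          = (let line := PySem.Str.strip raw
             let active₁ := if active ≠ "" then active ++ " " ++ line else line
             if PySem.Str.endswith active₁ "\\" then
               (cmds, PySem.Str.rstrip (PySem.Str.slice active₁ none (some (-1))))
             else (cmds ++ [active₁], "")) := by
        unfold nblStepA
        simp [hne, hnh']
      rw [hGuard]
      set line := PySem.Str.strip raw with hline
      have hlr : PySem.Chars.rstrip line.toList = line.toList := by
        simp [hline, nbl_rstrip_strip]
      by_cases hA0 : active = ""
      · -- accumulator empty: pieces is empty too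
        have hp0 : pieces = [] := (nbl_parts_ne_iff hinv).mp hA0
        subst hp0
        subst hA0
        simp only [ne_eq, not_true_eq_false, if_false]
        by_cases hEw : PySem.Str.endswith line "\\" = true
        · -- continuation
          rw [if_pos hEw]
          set piece := PySem.Str.rstrip (PySem.Str.slice line none (some (-1))) with hpiece
          have hpr : PySem.Chars.rstrip piece.toList = piece.toList := by
            simp [hpiece, PySem.Str.rstrip, nbl_rstrip_idem]
          by_cases hp : piece = ""
          · have hGo : nblGo [] (line :: ((ls.map (fun raw => PySem.Str.strip raw)).filter
                (fun s => decide (s ≠ "") && !PySem.Str.startswith s "#")))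
                = nblGo [] ((ls.map (fun raw => PySem.Str.strip raw)).filter
                (fun s => decide (s ≠ "") && !PySem.Str.startswith s "#")) := by
              simp only [nblGo, hEw, if_true, ← hpiece]
              rw [if_neg (by simp [hp])]
            rw [hGo]
            exact ih cmds piece [] ⟨by simp [hp, PySem.Chars.join_nil], hpr, by simp⟩
          · have hGo : nblGo [] (line :: ((ls.map (fun raw => PySem.Str.strip raw)).filter
                (fun s => decide (s ≠ "") && !PySem.Str.startswith s "#")))
                = nblGo ([] ++ [piece]) ((ls.map (fun raw => PySem.Str.strip raw)).filter
                (fun s => decide (s ≠ "") && !PySem.Str.startswith s "#")) := by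
              simp only [nblGo, hEw, if_true, ← hpiece]
              rw [if_pos hp]
            rw [hGo, List.nil_append]
            refine ih cmds piece [piece] ⟨?_, hpr, by simp [hp]⟩
            simp [PySem.Chars.join_singleton]
        · -- emit
          rw [if_neg hEw]
          have hEw'' : PySem.Str.endswith line "\\" = false := by simpa using hEw
          have hGo : nblGo [] (line :: ((ls.map (fun raw => PySem.Str.strip raw)).filter
              (fun s => decide (s ≠ "") && !PySem.Str.startswith s "#")))
              = PySem.Str.join " " [line] :: nblGo [] ((ls.map (fun raw => PySem.Str.strip raw)).filter
              (fun s => decide (s ≠ "") && !PySem.Str.startswith s "#")) := by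
            simp only [nblGo, hEw'', Bool.false_eq_true, if_false, List.nil_append]
          rw [hGo]
          have hj : PySem.Str.join " " [line] = line := by
            rw [← String.toList_inj, nbl_join_str]
            simp [PySem.Chars.join_singleton]
          rw [hj]
          have := ih (cmds ++ [line]) "" [] ⟨by simp [PySem.Chars.join_nil], by simp [PySem.Chars.rstrip], by simp⟩
          rw [this]
          simp
      · -- accumulator nonempty: pieces nonempty
        have hpne : pieces ≠ [] := fun h => hA0 ((nbl_parts_ne_iff hinv).mpr h)
        obtain ⟨h1, h2, h3⟩ := hinv
        have hmapne : pieces.map String.toList ≠ [] := by simpa using hpne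
        simp only [if_pos hA0]
        have htl1 : (active ++ " " ++ line).toList = (active.toList ++ [' ']) ++ line.toList := by
          simp [String.toList_append, List.append_assoc]
        have hEweq : PySem.Str.endswith (active ++ " " ++ line) "\\" = PySem.Str.endswith line "\\" := by
          simp only [PySem.Str.endswith, htl1]
          have : ("\\" : String).toList = ['\\'] := by decide
          rw [this]
          exact nbl_endswith_append _ _ _ hlne
        by_cases hEw : PySem.Str.endswith line "\\" = true
        · -- continuation
          rw [if_pos (hEweq.trans hEw)]
          set piece := PySem.Str.rstrip (PySem.Str.slice line none (some (-1))) with hpiece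
          set activeA := PySem.Str.rstrip (PySem.Str.slice (active ++ " " ++ line) none (some (-1))) with hactA
          have hpt : piece.toList = PySem.Chars.rstrip (line.toList.dropLast) := by
            rw [hpiece, show (PySem.Str.rstrip (PySem.Str.slice line none (some (-1)))).toList
                = PySem.Chars.rstrip ((PySem.Str.slice line none (some (-1))).toList) from by
                  simp [PySem.Str.rstrip],
              PySem.Str.slice_to_neg_one]
          have haT : activeA.toList
              = if piece.toList = [] then active.toList else active.toList ++ [' '] ++ piece.toList := by
            have hdl : ((active ++ " " ++ line).toList).dropLast
                = (active.toList ++ [' ']) ++ line.toList.dropLast := by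
              rw [htl1, List.dropLast_append_of_ne_nil hlne]
            have hr1 : PySem.Chars.rstrip (active.toList ++ [' ']) = active.toList := by
              rw [nbl_rstrip_append]
              simp only [if_pos (by decide : PySem.Chars.rstrip [' '] = ([] : List Char))]
              exact h2
            have hA' : activeA.toList = PySem.Chars.rstrip (((active ++ " " ++ line).toList).dropLast) := by
              rw [hactA, show (PySem.Str.rstrip (PySem.Str.slice (active ++ " " ++ line) none (some (-1)))).toList
                  = PySem.Chars.rstrip ((PySem.Str.slice (active ++ " " ++ line) none (some (-1))).toList) from by
                    simp [PySem.Str.rstrip],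
                PySem.Str.slice_to_neg_one]
            rw [hA', hdl, nbl_rstrip_append, ← hpt, hr1]
          have hpr : PySem.Chars.rstrip activeA.toList = activeA.toList := by
            simp [hactA, PySem.Str.rstrip, nbl_rstrip_idem]
          by_cases hp : piece = ""
          · have hGo : nblGo pieces (line :: ((ls.map (fun raw => PySem.Str.strip raw)).filter
                (fun s => decide (s ≠ "") && !PySem.Str.startswith s "#")))
                = nblGo pieces ((ls.map (fun raw => PySem.Str.strip raw)).filter
                (fun s => decide (s ≠ "") && !PySem.Str.startswith s "#")) := by
              simp only [nblGo, hEw, if_true, ← hpiece]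
              rw [if_neg (by simp [hp])]
            rw [hGo]
            refine ih cmds activeA pieces ⟨?_, hpr, h3⟩
            rw [haT, if_pos (by simp [hp]), h1]
          · have hGo : nblGo pieces (line :: ((ls.map (fun raw => PySem.Str.strip raw)).filter
                (fun s => decide (s ≠ "") && !PySem.Str.startswith s "#")))
                = nblGo (pieces ++ [piece]) ((ls.map (fun raw => PySem.Str.strip raw)).filter
                (fun s => decide (s ≠ "") && !PySem.Str.startswith s "#")) := by
              simp only [nblGo, hEw, if_true, ← hpiece]
              rw [if_pos hp]
            rw [hGo]
            have hptl : piece.toList ≠ [] := by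
              simpa [Ne, String.toList_eq_nil_iff] using hp
            refine ih cmds activeA (pieces ++ [piece]) ⟨?_, hpr, ?_⟩
            · rw [haT, if_neg hptl, List.map_append, List.map_cons, List.map_nil,
                nbl_join_append_singleton, if_neg hmapne, h1]
            · intro p hpmem
              rcases List.mem_append.mp hpmem with hmem | hmem
              · exact h3 p hmem
              · rw [List.mem_singleton] at hmem
                subst hmem
                exact hp
        · -- emit
          have hEw' : PySem.Str.endswith line "\\" = false := by simpa using hEw
          have hcond : PySem.Str.endswith (active ++ " " ++ line) "\\" = false := by
            rw [hEweq]; exact hEw'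
          simp only [hcond, Bool.false_eq_true, if_false]
          have hGo : nblGo pieces (line :: ((ls.map (fun raw => PySem.Str.strip raw)).filter
              (fun s => decide (s ≠ "") && !PySem.Str.startswith s "#")))
              = PySem.Str.join " " (pieces ++ [line]) :: nblGo [] ((ls.map (fun raw => PySem.Str.strip raw)).filter
              (fun s => decide (s ≠ "") && !PySem.Str.startswith s "#")) := by
            simp only [nblGo, hEw', Bool.false_eq_true, if_false]
          rw [hGo]
          have hj : PySem.Str.join " " (pieces ++ [line]) = active ++ " " ++ line := by
            rw [← String.toList_inj, nbl_join_str, htl1, List.map_append, List.map_cons,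
              List.map_nil, nbl_join_append_singleton, if_neg hmapne, ← h1]
          rw [hj]
          have := ih (cmds ++ [active ++ " " ++ line]) "" []
            ⟨by simp [PySem.Chars.join_nil], by simp [PySem.Chars.rstrip], by simp⟩
          rw [this]
          simp

-- B side: the reverse foldl, flushed and reversed, equals the spec
theorem nbl_B_go : ∀ (rest : List String),
    ((rest.any (fun l => !PySem.Str.endswith l "\\")) = true →
       (rest.reverse.foldl nblStepB ([], [])).2 ≠ []) ∧
    ((rest.any (fun l => !PySem.Str.endswith l "\\")) = false →
       (rest.reverse.foldl nblStepB ([], [])).1 = []) ∧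
    ∀ pieces, nblGo pieces rest =
      if (rest.any (fun l => !PySem.Str.endswith l "\\")) = true then
        PySem.Str.join " " (pieces ++ (rest.reverse.foldl nblStepB ([], [])).2)
          :: (rest.reverse.foldl nblStepB ([], [])).1.reverse
      else if pieces ++ (rest.reverse.foldl nblStepB ([], [])).2 ≠ [] then
        [PySem.Str.join " " (pieces ++ (rest.reverse.foldl nblStepB ([], [])).2)]
      else [] := by
  intro rest
  induction rest with
  | nil =>
    refine ⟨by simp, fun _ => rfl, ?_⟩
    intro pieces
    simp [nblGo]
  | cons l t ih =>
    obtain ⟨ih1, ih2, ih3⟩ := ih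
    have hfold : (l :: t).reverse.foldl nblStepB ([], [])
        = nblStepB (t.reverse.foldl nblStepB ([], [])) l := by
      rw [List.reverse_cons, List.foldl_append, List.foldl_cons, List.foldl_nil]
    set st := t.reverse.foldl nblStepB ([], []) with hst
    by_cases hEw : PySem.Str.endswith l "\\" = true
    · -- l is a continuation line
      set p := PySem.Str.rstrip (PySem.Str.slice l none (some (-1))) with hp
      have hstep : nblStepB st l = if p ≠ "" then (st.1, p :: st.2) else st := by
        unfold nblStepB
        simp only [hEw, if_true, ← hp]
      have hany : (l :: t).any (fun l => !PySem.Str.endswith l "\\") = t.any (fun l => !PySem.Str.endswith l "\\") := by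
        simp only [List.any_cons, hEw, Bool.not_true, Bool.false_or]
      by_cases hp0 : p = ""
      · rw [if_neg (by simp [hp0])] at hstep
        refine ⟨?_, ?_, ?_⟩
        · rw [hany, hfold, hstep]; exact ih1
        · rw [hany, hfold, hstep]; exact ih2
        · intro pieces
          have hGo : nblGo pieces (l :: t) = nblGo pieces t := by
            simp only [nblGo, hEw, if_true, ← hp]
            rw [if_neg (by simp [hp0])]
          rw [hGo, hany, hfold, hstep]
          exact ih3 pieces
      · rw [if_pos hp0] at hstep
        refine ⟨?_, ?_, ?_⟩
        · rw [hany, hfold, hstep]; intro _; simp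
        · rw [hany, hfold, hstep]; exact ih2
        · intro pieces
          have hGo : nblGo pieces (l :: t) = nblGo (pieces ++ [p]) t := by
            simp only [nblGo, hEw, if_true, ← hp]
            rw [if_pos hp0]
          rw [hGo, hany, hfold, hstep]
          have := ih3 (pieces ++ [p])
          simpa [List.append_assoc] using this
    · -- l is a terminator line
      have hEw' : PySem.Str.endswith l "\\" = false := by simpa using hEw
      have hstep : nblStepB st l
          = ((if st.2 ≠ [] then st.1 ++ [PySem.Str.join " " st.2] else st.1), [l]) := by
        unfold nblStepB
        simp only [hEw', Bool.false_eq_true, if_false]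
      have hany : (l :: t).any (fun l => !PySem.Str.endswith l "\\") = true := by
        simp only [List.any_cons, hEw', Bool.not_false, Bool.true_or]
      refine ⟨?_, ?_, ?_⟩
      · rw [hfold, hstep]; intro _; simp
      · intro h; rw [hany] at h; exact absurd h (by simp)
      · intro pieces
        have hGo : nblGo pieces (l :: t) = PySem.Str.join " " (pieces ++ [l]) :: nblGo [] t := by
          simp only [nblGo, hEw', Bool.false_eq_true, if_false]
        rw [hGo, hany, if_pos rfl, hfold, hstep]
        have ht := ih3 []
        by_cases hT : t.any (fun l => !PySem.Str.endswith l "\\") = true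
        · have hcur := ih1 hT
          rw [if_pos hT] at ht
          simp only [List.nil_append] at ht
          rw [ht, if_pos hcur]
          simp
        · have hT' : t.any (fun l => !PySem.Str.endswith l "\\") = false := by
            simpa using hT
          have hrc := ih2 hT'
          rw [hT', if_neg (by simp)] at ht
          simp only [List.nil_append] at ht
          rw [ht, hrc]
          by_cases hc : st.2 = []
          · rw [if_neg (by simp [hc]), if_neg (by simp [hc])]
            simp
          · rw [if_pos (by simp [hc]), if_pos hc]
            simp

-- ===== VERDICT (by name: the statement is the Claim_ definition above) =====
theorem normalize_bash_lines_py_spec : Claim_equal_normalize_bash_lines_py := by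
  intro lines _
  unfold Spec_normalize_bash_lines_py normalize_bash_lines_py normalize_bash_lines_py_alt
  have hA := nbl_A_go lines [] "" []
    ⟨by simp [PySem.Chars.join_nil], by simp [PySem.Chars.rstrip], by simp⟩
  set cleaned := (lines.map (fun raw => PySem.Str.strip raw)).filter
      (fun s => decide (s ≠ "") && !PySem.Str.startswith s "#") with hcl
  obtain ⟨hB1, hB2, hB3⟩ := nbl_B_go cleaned
  set st := cleaned.reverse.foldl nblStepB ([], []) with hstB
  have hgo := hB3 []
  simp only [List.nil_append] at hgo
  have hlist : (if (lines.foldl nblStepA ([], "")).2 ≠ "" then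
        (lines.foldl nblStepA ([], "")).1 ++ [(lines.foldl nblStepA ([], "")).2]
      else (lines.foldl nblStepA ([], "")).1)
      = (if st.2 ≠ [] then st.1 ++ [PySem.Str.join " " st.2] else st.1).reverse := by
    rw [hA, List.nil_append, hgo]
    by_cases hT : cleaned.any (fun l => !PySem.Str.endswith l "\\") = true
    · rw [if_pos hT, if_pos (hB1 hT)]
      simp
    · have hT' : cleaned.any (fun l => !PySem.Str.endswith l "\\") = false := by simpa using hT
      rw [hT', if_neg (by simp), hB2 hT']
      by_cases hc : st.2 = []
      · rw [if_neg (by simp [hc]), if_neg (by simp [hc])]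
        simp
      · rw [if_pos hc, if_pos hc]
        simp
  simp only [← hstB]
  rw [hlist]
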